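-- pv_equiv track=rewrite | github.com/tzurshubi/BiHS | src/search_coil_subpath_flip.py | rotate_to_min_repr
-- ===== SOURCE A (Python) =====
-- from typing import List, Optional, Tuple, Dict
--
-- def rotate_to_min_repr(cycle: List[int]) -> Tuple[int, ...]:
--     n = len(cycle)
--     if n == 0:
--         return tuple()
--
--     best = None
--     for start in range(n):
--         rot = tuple(cycle[start:] + cycle[:start])
--         if best is None or rot < best:
--             best = rot
--
--     rev = list(reversed(cycle))
--     for start in range(n):
--         rot = tuple(rev[start:] + rev[:start])
--         if rot < best:
--             best = rot
--
--     return best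
-- ===== SOURCE B (Python) =====
-- from typing import List, Tuple
--
-- def rotate_to_min_repr(cycle: List[int]) -> Tuple[int, ...]:
--     n = len(cycle)
--     if n == 0:
--         return tuple()
--
--     def best_start(seq):
--         # candidate elimination: keep the starts whose length-k prefix of the rotation
--         # is minimal, extending the prefix one position at a time
--         d = seq + seq
--         cands = list(range(n))
--         k = 0
--         while len(cands) > 1 and k < n:
--             m = min(d[i + k] for i in cands)
--             cands = [i for i in cands if d[i + k] == m]
--             k += 1
--             if len(cands) == n:
--                 # every start survived a round: all elements are equal,
--                 # so every rotation is the same list — any start is minimal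
--                 break
--         return cands[0]
--
--     s = best_start(cycle)
--     a = tuple(cycle[s:] + cycle[:s])
--     rev = cycle[::-1]
--     t = best_start(rev)
--     b = tuple(rev[t:] + rev[:t])
--     return a if a <= b else b
-- ===== Notes on version B (the rewrite author's own statement) =====
-- stated objective: faster
-- what changed: Instead of materialising all 2n rotations and scanning for the minimum, B finds the minimal rotation start of the cycle and of its reversal by candidate elimination (keep the starts whose length-k prefix is minimal, growing k), then compares the two winning rotations.
import Mathlib
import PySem

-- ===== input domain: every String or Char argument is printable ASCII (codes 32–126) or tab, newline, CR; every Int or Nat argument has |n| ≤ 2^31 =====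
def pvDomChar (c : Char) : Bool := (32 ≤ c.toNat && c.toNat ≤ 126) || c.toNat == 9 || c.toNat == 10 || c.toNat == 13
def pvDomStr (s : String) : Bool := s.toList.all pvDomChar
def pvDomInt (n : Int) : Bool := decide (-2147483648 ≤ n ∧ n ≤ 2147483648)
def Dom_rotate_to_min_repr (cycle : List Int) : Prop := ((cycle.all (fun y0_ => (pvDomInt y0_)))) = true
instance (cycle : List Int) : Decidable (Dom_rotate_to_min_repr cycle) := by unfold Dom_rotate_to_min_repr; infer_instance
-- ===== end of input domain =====

-- B replaces A's enumerate-all-2n-rotations-and-keep-the-min scan by candidate elimination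
-- (per direction, keep the starts whose length-k prefix is minimal while growing k), then
-- compares the two winning rotations.

-- ===== PORT A =====
-- Python 'cycle[start:] + cycle[:start]' with 0 ≤ start < len(cycle): the slices are exactly
-- List.drop / List.take (indices in range, no clamping or negatives involved).
-- One fold per Python 'for start in range(n)' loop, accumulator = the Optional 'best'.
-- (The 'none' branch is Python's 'best is None' test of loop 1; in loop 2 it is unreachable,
-- since after loop 1 with n > 0 best is not None.)
def pvMinStep (best : Option (List Int)) (rot : List Int) : Option (List Int) :=
  match best with
  | none => some rot
  | some b => if rot < b then some rot else some b

def rotate_to_min_repr (cycle : List Int) : List Int :=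
  let n := cycle.length
  if n = 0 then []
  else
    let best := (List.range n).foldl
      (fun best start => pvMinStep best (cycle.drop start ++ cycle.take start)) none
    let rev := cycle.reverse
    let best2 := (List.range n).foldl
      (fun best start => pvMinStep best (rev.drop start ++ rev.take start)) best
    best2.getD []

-- ===== PORT B =====
-- Source B's while loop: 'fuel' counts down n - k, mirroring the 'k < n' conjunct of the condition;
-- the early break ('every start survived a round: all elements equal') is the inner if.
def pvRefine (d : List Int) (n : Nat) : Nat → Nat → List Nat → List Nat
  | 0, _, cands => cands
  | fuel + 1, k, cands =>
    if cands.length ≤ 1 then cands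
    else
      let m := (PySem.List.min? (cands.map (fun i => d.getD (i + k) 0)) (fun x => x)).getD 0
      let cands' := cands.filter (fun i => d.getD (i + k) 0 == m)
      if cands'.length = n then cands'
      else pvRefine d n fuel (k + 1) cands'

def pvBestStart (seq : List Int) : Nat :=
  (pvRefine (seq ++ seq) seq.length seq.length 0 (List.range seq.length)).headD 0

def rotate_to_min_repr_alt (cycle : List Int) : List Int :=
  let n := cycle.length
  if n = 0 then []
  else
    let s := pvBestStart cycle
    let a := cycle.drop s ++ cycle.take s
    let rev := cycle.reverse
    let t := pvBestStart rev
    let b := rev.drop t ++ rev.take t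
    if a ≤ b then a else b

-- ===== PRECONDITION & SPEC =====
def Spec_rotate_to_min_repr (cycle : List Int) (out : List Int) : Prop := out = rotate_to_min_repr_alt cycle
instance (cycle : List Int) (out : List Int) : Decidable (Spec_rotate_to_min_repr cycle out) := by unfold Spec_rotate_to_min_repr; infer_instance

-- ===== CLAIM (what is proved, stated in full; the proofs are below) =====
def Claim_equal_rotate_to_min_repr : Prop := ∀ (cycle : List Int), Dom_rotate_to_min_repr cycle → Spec_rotate_to_min_repr cycle (rotate_to_min_repr cycle)

-- ===== LEMMAS AND PROOFS =====

-- the rotation of s starting at position i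
def pvRot (s : List Int) (i : Nat) : List Int := s.drop i ++ s.take i

theorem pvLex_cons_iff (x y : Int) (l₁ l₂ : List Int) :
    (x :: l₁ : List Int) < (y :: l₂) ↔ x < y ∨ (x = y ∧ l₁ < l₂) := by
  constructor
  · intro h
    cases h with
    | rel h => exact Or.inl h
    | cons h => exact Or.inr ⟨rfl, h⟩
  · rintro (h | ⟨rfl, h⟩)
    · exact List.Lex.rel h
    · exact List.Lex.cons h

theorem pvNotNilLt : ¬ (([] : List Int) < []) := fun h => by cases h

theorem pvLt_of_take_lt : ∀ {k : Nat} {xs ys : List Int}, xs.take k < ys.take k → xs < ys := by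
  intro k
  induction k with
  | zero => intro xs ys h; simp only [List.take_zero] at h; exact absurd h pvNotNilLt
  | succ k ih =>
    intro xs ys h
    match xs, ys with
    | [], [] => exact h
    | [], y :: ys => exact List.Lex.nil
    | x :: xs, [] => simp only [List.take_nil] at h; cases h
    | x :: xs, y :: ys =>
      simp only [List.take_succ_cons] at h
      rcases (pvLex_cons_iff x y (xs.take k) (ys.take k)).1 h with h' | ⟨heq, h'⟩
      · exact List.Lex.rel h'
      · exact heq ▸ List.Lex.cons (ih h')

theorem pvTake_le_take {xs ys : List Int} (h : xs ≤ ys) (k : Nat) : xs.take k ≤ ys.take k := by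
  by_contra hc
  exact absurd (pvLt_of_take_lt (lt_of_not_ge hc)) (not_lt_of_ge h)

theorem pvAppend_singleton_lt_iff : ∀ (xs ys : List Int) (a b : Int), xs.length = ys.length →
    (xs ++ [a] < ys ++ [b] ↔ xs < ys ∨ (xs = ys ∧ a < b)) := by
  intro xs
  induction xs with
  | nil =>
    intro ys a b h
    match ys with
    | [] =>
      simp only [List.nil_append]
      rw [pvLex_cons_iff]
      constructor
      · rintro (h' | ⟨-, h'⟩)
        · exact Or.inr ⟨by simp, h'⟩
        · exact absurd h' pvNotNilLt
      · rintro (h' | ⟨-, h'⟩)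
        · exact absurd h' pvNotNilLt
        · exact Or.inl h'
    | y :: ys => simp at h
  | cons x xs ih =>
    intro ys a b h
    match ys with
    | [] => simp at h
    | y :: ys =>
      simp only [List.cons_append]
      rw [pvLex_cons_iff, pvLex_cons_iff, ih ys a b (by simpa using h)]
      constructor
      · rintro (h' | ⟨rfl, h' | ⟨rfl, h'⟩⟩)
        · exact Or.inl (Or.inl h')
        · exact Or.inl (Or.inr ⟨rfl, h'⟩)
        · exact Or.inr ⟨rfl, h'⟩
      · rintro ((h' | ⟨rfl, h'⟩) | ⟨heq, h'⟩)
        · exact Or.inl h'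
        · exact Or.inr ⟨rfl, Or.inl h'⟩
        · rcases List.cons.injEq .. ▸ heq with ⟨rfl, rfl⟩
          exact Or.inr ⟨rfl, Or.inr ⟨rfl, h'⟩⟩

theorem pvAppend_singleton_le_iff (xs ys : List Int) (a b : Int) (h : xs.length = ys.length) :
    (xs ++ [a] ≤ ys ++ [b] ↔ xs ≤ ys ∧ (xs = ys → a ≤ b)) := by
  rw [le_iff_lt_or_eq, pvAppend_singleton_lt_iff xs ys a b h]
  constructor
  · rintro ((h' | ⟨rfl, h'⟩) | h')
    · exact ⟨le_of_lt h', fun he => absurd (he ▸ h') (lt_irrefl _)⟩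
    · exact ⟨le_refl _, fun _ => le_of_lt h'⟩
    · rcases List.append_inj' h' (by simp) with ⟨rfl, hab⟩
      simp at hab
      exact ⟨le_refl _, fun _ => le_of_eq hab⟩
  · rintro ⟨h1, h2⟩
    rcases lt_or_eq_of_le h1 with h' | rfl
    · exact Or.inl (Or.inl h')
    · rcases lt_or_eq_of_le (h2 rfl) with h' | rfl
      · exact Or.inl (Or.inr ⟨rfl, h'⟩)
      · exact Or.inr rfl

theorem pvRot_length (s : List Int) (i : Nat) : (pvRot s i).length = s.length := by
  simp [pvRot]; omega

theorem pvD_getD (s : List Int) (i k : Nat) (hi : i < s.length) (hk : k < s.length) :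
    (s ++ s).getD (i + k) 0 = (pvRot s i).getD k 0 := by
  rcases Nat.lt_or_ge (i + k) s.length with h | h
  · rw [List.getD_eq_getElem?_getD, List.getD_eq_getElem?_getD,
      List.getElem?_append_left (by simpa using h)]
    unfold pvRot
    rw [List.getElem?_append_left (by simp; omega), List.getElem?_drop]
  · have hd : (List.drop i s).length = s.length - i := by simp
    rw [List.getD_eq_getElem?_getD, List.getD_eq_getElem?_getD,
      List.getElem?_append_right (by simpa using h)]
    unfold pvRot
    rw [List.getElem?_append_right (by rw [hd]; omega),
      List.getElem?_take_of_lt (by rw [hd]; omega)]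
    have he : k - (List.drop i s).length = i + k - s.length := by rw [hd]; omega
    rw [he]

theorem pvTake_succ_rot (s : List Int) (i k : Nat) (hk : k < s.length) :
    (pvRot s i).take (k + 1) = (pvRot s i).take k ++ [(pvRot s i).getD k 0] := by
  have hlen : k < (pvRot s i).length := by rw [pvRot_length]; omega
  rw [List.take_add_one, List.getElem?_eq_getElem hlen]
  simp [List.getD_eq_getElem?_getD, List.getElem?_eq_getElem hlen]

-- invariant of the refinement loop: cands is exactly the nonempty set of starts whose
-- length-k prefix of the rotation is minimal
def pvInv (s : List Int) (k : Nat) (cands : List Nat) : Prop :=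
  cands ≠ [] ∧ cands.Nodup ∧ (∀ i ∈ cands, i < s.length) ∧
    ∀ i, i < s.length → (i ∈ cands ↔ ∀ j, j < s.length → (pvRot s i).take k ≤ (pvRot s j).take k)

theorem pvInv_step (s : List Int) (k : Nat) (cands : List Nat)
    (hinv : pvInv s k cands) (hk : k < s.length) :
    pvInv s (k + 1)
      (cands.filter (fun i => (s ++ s).getD (i + k) 0 ==
        (PySem.List.min? (cands.map (fun i => (s ++ s).getD (i + k) 0)) (fun x => x)).getD 0)) := by
  obtain ⟨hne, hnd, hbd, hiff⟩ := hinv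
  obtain ⟨m, hm⟩ : ∃ m, PySem.List.min? (cands.map (fun i => (s ++ s).getD (i + k) 0)) (fun x => x) = some m := by
    cases h : PySem.List.min? (cands.map (fun i => (s ++ s).getD (i + k) 0)) (fun x => x) with
    | none =>
      rw [PySem.List.min?_eq_none_iff, List.map_eq_nil_iff] at h
      exact absurd h hne
    | some m => exact ⟨m, rfl⟩
  obtain ⟨j0, hj0c, hj0v⟩ := List.mem_map.1 (PySem.List.min?_mem hm)
  have hmin : ∀ i ∈ cands, m ≤ (s ++ s).getD (i + k) 0 := fun i hi =>
    PySem.List.min?_isMin hm _ (List.mem_map_of_mem hi)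
  have hpre : ∀ i ∈ cands, ∀ j ∈ cands, (pvRot s i).take k = (pvRot s j).take k := by
    intro i hi j hj
    exact le_antisymm ((hiff i (hbd i hi)).1 hi j (hbd j hj))
      ((hiff j (hbd j hj)).1 hj i (hbd i hi))
  have hlen : ∀ i j : Nat, ((pvRot s i).take k).length = ((pvRot s j).take k).length := by
    intro i j; simp [pvRot_length]
  rw [hm]
  simp only [Option.getD_some]
  refine ⟨?_, hnd.filter _, ?_, ?_⟩
  · intro hnil
    have : j0 ∈ cands.filter (fun i => (s ++ s).getD (i + k) 0 == m) :=
      List.mem_filter.2 ⟨hj0c, by simp only [beq_iff_eq]; exact hj0v⟩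
    rw [hnil] at this
    cases this
  · intro i hi
    exact hbd i (List.mem_filter.1 hi).1
  · intro i hi
    constructor
    · intro hif j hj
      obtain ⟨hic, hieq⟩ := List.mem_filter.1 hif
      have hieq : (s ++ s).getD (i + k) 0 = m := by simpa using hieq
      rw [pvTake_succ_rot s i k hk, pvTake_succ_rot s j k hk,
        pvAppend_singleton_le_iff _ _ _ _ (hlen i j)]
      refine ⟨(hiff i hi).1 hic j hj, ?_⟩
      intro heq
      have hjc : j ∈ cands := by
        refine (hiff j hj).2 ?_
        intro l hl
        rw [← heq]
        exact (hiff i hi).1 hic l hl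
      rw [← pvD_getD s i k hi hk, ← pvD_getD s j k hj hk, hieq]
      exact hmin j hjc
    · intro hall
      have hic : i ∈ cands := by
        refine (hiff i hi).2 ?_
        intro j hj
        have h2 := pvTake_le_take (hall j hj) k
        simpa [List.take_take] using h2
      refine List.mem_filter.2 ⟨hic, ?_⟩
      have h1 : m ≤ (s ++ s).getD (i + k) 0 := hmin i hic
      have hj0n : j0 < s.length := hbd j0 hj0c
      have heqp : (pvRot s i).take k = (pvRot s j0).take k := hpre i hic j0 hj0c
      have h2 : (s ++ s).getD (i + k) 0 ≤ (s ++ s).getD (j0 + k) 0 := by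
        have := hall j0 hj0n
        rw [pvTake_succ_rot s i k hk, pvTake_succ_rot s j0 k hk,
          pvAppend_singleton_le_iff _ _ _ _ (hlen i j0)] at this
        rw [pvD_getD s i k hi hk, pvD_getD s j0 k hj0n hk]
        exact this.2 heqp
      rw [hj0v] at h2
      simp only [beq_iff_eq]
      exact le_antisymm h2 h1

theorem pvFull_mem (cands : List Nat) (n : Nat) (hnd : cands.Nodup)
    (hbd : ∀ i ∈ cands, i < n) (hlen : cands.length = n) : ∀ i, i < n → i ∈ cands := by
  intro i hi
  have h1 : cands.toFinset ⊆ Finset.range n := by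
    intro x hx
    rw [List.mem_toFinset] at hx
    exact Finset.mem_range.2 (hbd x hx)
  have h2 : cands.toFinset.card = n := by
    rw [List.toFinset_card_of_nodup hnd, hlen]
  have h3 : cands.toFinset = Finset.range n :=
    Finset.eq_of_subset_of_card_le h1 (by rw [h2, Finset.card_range])
  have : i ∈ cands.toFinset := by rw [h3]; exact Finset.mem_range.2 hi
  exact List.mem_toFinset.1 this

-- if every start has a minimal (k+1)-prefix, all elements of s are equal and
-- every rotation is s itself
theorem pvAllEq (s : List Int) (k : Nat) (cands : List Nat)
    (hinv : pvInv s (k + 1) cands) (hlen : cands.length = s.length) :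
    ∀ j, j < s.length → pvRot s (cands.headD 0) ≤ pvRot s j := by
  obtain ⟨hne, hnd, hbd, hiff⟩ := hinv
  have hall : ∀ i, i < s.length → i ∈ cands := pvFull_mem cands s.length hnd hbd hlen
  have hgd : ∀ i, i < s.length → (pvRot s i).getD 0 0 = s.getD i 0 := by
    intro i hi
    unfold pvRot
    rw [List.getD_eq_getElem?_getD, List.getElem?_append_left (by simp; omega),
      List.getElem?_drop, List.getD_eq_getElem?_getD, Nat.add_zero]
  have heq1 : ∀ i j, i < s.length → j < s.length → s.getD i 0 = s.getD j 0 := by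
    intro i j hi hj
    have hpe : (pvRot s i).take (k + 1) = (pvRot s j).take (k + 1) :=
      le_antisymm ((hiff i hi).1 (hall i hi) j hj) ((hiff j hj).1 (hall j hj) i hi)
    have h0 : (pvRot s i).getD 0 0 = (pvRot s j).getD 0 0 := by
      have := congrArg (fun l => l.getD 0 0) hpe
      simpa [List.getD_eq_getElem?_getD, List.getElem?_take_of_lt (Nat.succ_pos k)] using this
    rw [← hgd i hi, ← hgd j hj, h0]
  have hrep : s = List.replicate s.length (s.getD 0 0) := by
    apply List.ext_getElem (by simp)
    intro p hp _
    have h0 : (0 : Nat) < s.length := by omega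
    have := heq1 p 0 hp h0
    simp only [List.getD_eq_getElem?_getD, List.getElem?_eq_getElem hp,
      List.getElem?_eq_getElem h0, Option.getD_some] at this
    simp [this, List.getD_eq_getElem?_getD, List.getElem?_eq_getElem h0]
  have hrot : ∀ (n : Nat) (c : Int) (i : Nat), i < n →
      pvRot (List.replicate n c) i = List.replicate n c := by
    intro n c i hi
    unfold pvRot
    rw [List.drop_replicate, List.take_replicate, ← List.replicate_add]
    congr 1
    rw [Nat.min_eq_left hi.le]
    omega
  intro j hj
  have hh : cands.headD 0 ∈ cands := by
    cases cands with
    | nil => exact absurd rfl hne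
    | cons c t => exact List.mem_cons_self
  have hhd : cands.headD 0 < s.length := hbd _ hh
  rw [hrep]
  rw [hrot _ _ _ hhd, hrot _ _ _ hj]

theorem pvRefine_spec (s : List Int) : ∀ (fuel k : Nat) (cands : List Nat),
    pvInv s k cands → k + fuel = s.length →
    pvRefine (s ++ s) s.length fuel k cands ≠ [] ∧
    (∀ i ∈ pvRefine (s ++ s) s.length fuel k cands, i < s.length) ∧
    ∀ j, j < s.length →
      pvRot s ((pvRefine (s ++ s) s.length fuel k cands).headD 0) ≤ pvRot s j := by
  intro fuel
  induction fuel with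
  | zero =>
    intro k cands hinv hfk
    obtain ⟨hne, hnd, hbd, hiff⟩ := hinv
    have hk : k = s.length := by omega
    subst hk
    refine ⟨hne, hbd, ?_⟩
    intro j hj
    have hmem : cands.headD 0 ∈ cands := by
      cases cands with
      | nil => exact absurd rfl hne
      | cons c t => exact List.mem_cons_self
    have := (hiff _ (hbd _ hmem)).1 hmem j hj
    rwa [List.take_of_length_le (by rw [pvRot_length]),
      List.take_of_length_le (by rw [pvRot_length])] at this
  | succ fuel ih =>
    intro k cands hinv hfk
    simp only [pvRefine]
    by_cases hsmall : cands.length ≤ 1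
    · simp only [if_pos hsmall]
      obtain ⟨hne, hnd, hbd, hiff⟩ := hinv
      obtain ⟨i0, rfl⟩ : ∃ i0, cands = [i0] := by
        cases cands with
        | nil => exact absurd rfl hne
        | cons c t =>
          cases t with
          | nil => exact ⟨c, rfl⟩
          | cons d t' => simp at hsmall
      refine ⟨hne, hbd, ?_⟩
      intro j hj
      simp only [List.headD_cons]
      by_contra hc
      have hji : pvRot s j < pvRot s i0 := lt_of_not_ge hc
      have hjnc : j ∉ ([i0] : List Nat) := by
        intro hmem
        rcases List.mem_singleton.1 hmem with rfl
        exact absurd hji (lt_irrefl _)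
      have hnotmin := (not_iff_not.2 (hiff j hj)).1 hjnc
      push Not at hnotmin
      obtain ⟨l, hl, hl1⟩ := hnotmin
      have hi0 : (pvRot s i0).take k ≤ (pvRot s l).take k :=
        (hiff i0 (hbd i0 (by simp))).1 (by simp) l hl
      have : pvRot s i0 < pvRot s j := pvLt_of_take_lt (lt_of_le_of_lt hi0 hl1)
      exact absurd (lt_trans this hji) (lt_irrefl _)
    · simp only [if_neg hsmall]
      have hstep := pvInv_step s k cands hinv (by omega)
      by_cases hfull : (cands.filter (fun i => (s ++ s).getD (i + k) 0 ==
          (PySem.List.min? (cands.map (fun i => (s ++ s).getD (i + k) 0)) (fun x => x)).getD 0)).length = s.length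
      · simp only [if_pos hfull]
        obtain ⟨hne', hnd', hbd', hiff'⟩ := hstep
        exact ⟨hne', hbd', pvAllEq s k _ ⟨hne', hnd', hbd', hiff'⟩ hfull⟩
      · simp only [if_neg hfull]
        exact ih (k + 1) _ hstep (by omega)

theorem pvBestStart_spec (s : List Int) (h : s ≠ []) :
    pvBestStart s < s.length ∧ ∀ j, j < s.length → pvRot s (pvBestStart s) ≤ pvRot s j := by
  have hn : s.length ≠ 0 := by simpa using h
  have hinv : pvInv s 0 (List.range s.length) := by
    refine ⟨by simpa using hn, List.nodup_range, by simp, ?_⟩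
    intro i hi
    simp [List.mem_range, hi]
  obtain ⟨hne, hbd, hmin⟩ := pvRefine_spec s s.length 0 (List.range s.length) hinv (by omega)
  have hmem : (pvRefine (s ++ s) s.length s.length 0 (List.range s.length)).headD 0 ∈
      pvRefine (s ++ s) s.length s.length 0 (List.range s.length) := by
    cases hres : pvRefine (s ++ s) s.length s.length 0 (List.range s.length) with
    | nil => exact absurd hres hne
    | cons c t => exact List.mem_cons_self
  exact ⟨hbd _ hmem, hmin⟩

theorem pvMinStep_foldl_some (l : List (List Int)) (b : List Int) :
    ∃ m, l.foldl pvMinStep (some b) = some m ∧ (m = b ∨ m ∈ l) ∧ m ≤ b ∧ ∀ x ∈ l, m ≤ x := by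
  induction l generalizing b with
  | nil => exact ⟨b, rfl, Or.inl rfl, le_refl _, by simp⟩
  | cons x l ih =>
    simp only [List.foldl_cons]
    by_cases hx : x < b
    · simp only [pvMinStep, if_pos hx]
      obtain ⟨m, hm, hmem, hle, hall⟩ := ih x
      exact ⟨m, hm, Or.inr (hmem.elim (fun h => by simp [h]) (fun h => by simp [h])),
        le_trans hle (le_of_lt hx),
        by intro y hy; rcases List.mem_cons.1 hy with rfl | hy; exact hle; exact hall y hy⟩
    · simp only [pvMinStep, if_neg hx]
      obtain ⟨m, hm, hmem, hle, hall⟩ := ih b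
      refine ⟨m, hm, hmem.elim Or.inl (fun h => Or.inr (by simp [h])), hle, ?_⟩
      intro y hy; rcases List.mem_cons.1 hy with rfl | hy
      · exact le_trans hle (le_of_not_gt hx)
      · exact hall y hy

theorem pvMinStep_foldl_none (l : List (List Int)) (h : l ≠ []) :
    ∃ m, l.foldl pvMinStep none = some m ∧ m ∈ l ∧ ∀ x ∈ l, m ≤ x := by
  cases l with
  | nil => exact absurd rfl h
  | cons x l =>
    simp only [List.foldl_cons, pvMinStep]
    obtain ⟨m, hm, hmem, hle, hall⟩ := pvMinStep_foldl_some l x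
    refine ⟨m, hm, ?_, ?_⟩
    · rcases hmem with rfl | hmem
      · exact List.mem_cons_self
      · exact List.mem_cons_of_mem _ hmem
    · intro y hy
      rcases List.mem_cons.1 hy with rfl | hy
      · exact hle
      · exact hall y hy

-- ===== VERDICT (by name: the statement is the Claim_ definition above) =====
theorem rotate_to_min_repr_spec : Claim_equal_rotate_to_min_repr := by
  intro cycle _
  unfold Spec_rotate_to_min_repr rotate_to_min_repr rotate_to_min_repr_alt
  by_cases hn : cycle.length = 0
  · simp [hn]
  · simp only [if_neg hn]
    have hcne : cycle ≠ [] := fun h => hn (by simp [h])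
    have hrne : cycle.reverse ≠ [] := by simpa using hcne
    have hrlen : cycle.reverse.length = cycle.length := by simp
    set n := cycle.length with hn_def
    set L1 := (List.range n).map (pvRot cycle) with hL1
    set L2 := (List.range n).map (pvRot cycle.reverse) with hL2
    have hfold1 : (List.range n).foldl
        (fun best start => pvMinStep best (cycle.drop start ++ cycle.take start)) none
        = L1.foldl pvMinStep none := by
      rw [hL1, List.foldl_map]
      rfl
    have hL1ne : L1 ≠ [] := by
      rw [hL1]
      simp [List.map_eq_nil_iff, List.range_eq_nil, hn]
    obtain ⟨m1, hm1, hm1mem, hm1all⟩ := pvMinStep_foldl_none L1 hL1ne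
    have hfold2 : (List.range n).foldl
        (fun best start => pvMinStep best (cycle.reverse.drop start ++ cycle.reverse.take start))
        (some m1) = L2.foldl pvMinStep (some m1) := by
      rw [hL2, List.foldl_map]
      rfl
    obtain ⟨m, hm, hmmem, hmle1, hmall2⟩ := pvMinStep_foldl_some L2 m1
    -- A's result is m
    rw [hfold1, hm1, hfold2, hm]
    simp only [Option.getD_some]
    -- B's two winners
    obtain ⟨hs1, hs1min⟩ := pvBestStart_spec cycle hcne
    obtain ⟨hs2, hs2min⟩ := pvBestStart_spec cycle.reverse hrne
    set a := cycle.drop (pvBestStart cycle) ++ cycle.take (pvBestStart cycle) with ha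
    set b := cycle.reverse.drop (pvBestStart cycle.reverse) ++
      cycle.reverse.take (pvBestStart cycle.reverse) with hb
    have harot : a = pvRot cycle (pvBestStart cycle) := rfl
    have hbrot : b = pvRot cycle.reverse (pvBestStart cycle.reverse) := rfl
    have haL1 : a ∈ L1 := by
      rw [hL1, harot]
      exact List.mem_map_of_mem (List.mem_range.2 hs1)
    have hbL2 : b ∈ L2 := by
      rw [hL2, hbrot]
      exact List.mem_map_of_mem (List.mem_range.2 (hrlen ▸ hs2))
    have haall : ∀ x ∈ L1, a ≤ x := by
      intro x hx
      rw [hL1] at hx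
      obtain ⟨j, hj, rfl⟩ := List.mem_map.1 hx
      exact harot ▸ hs1min j (List.mem_range.1 hj)
    have hball : ∀ x ∈ L2, b ≤ x := by
      intro x hx
      rw [hL2] at hx
      obtain ⟨j, hj, rfl⟩ := List.mem_map.1 hx
      exact hbrot ▸ hs2min j (hrlen ▸ List.mem_range.1 hj)
    -- the compared results
    have hm1L : ∀ x ∈ L1, m ≤ x := fun x hx => le_trans hmle1 (hm1all x hx)
    by_cases hab : a ≤ b
    · simp only [if_pos hab]
      have h2 : a ≤ m := by
        rcases hmmem with rfl | hmem
        · exact haall m hm1mem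
        · exact le_trans hab (hball m hmem)
      exact le_antisymm (hm1L a haL1) h2
    · simp only [if_neg hab]
      have h2 : b ≤ m := by
        rcases hmmem with rfl | hmem
        · exact le_trans ((not_le.1 hab).le) (haall m hm1mem)
        · exact hball m hmem
      exact le_antisymm (hmall2 b hbL2) h2
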